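-- pv_equiv track=rewrite | github.com/jiyeoniing/CodingHub | 프로그래머스/1/340198. ［PCCE 기출문제］ 10번 ／ 공원/［PCCE 기출문제］ 10번 ／ 공원.py | solution
-- ===== SOURCE A (Python) =====
-- def check(n, width, height, park):
--     cnt=n*n
--
--     for r in range(height-n+1):
--         for c in range(width-n+1):
--
--             for i in range(r, r+n):
--                 for j in range(c, c+n):
--                     if park[i][j] =='-1':
--                         cnt -=1
--
--             if cnt==0:
--                 return True
--             else:
--                 cnt=n*n
--     return False
--
-- def solution(mats, park):
--
--     width=len(park[0]) # 공원 너비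
--     height=len(park) # 공원 높이
--     mats.sort(reverse=True)
--     answer=-1
--
--     for n in mats:
--         if check(n, width, height, park):
--             answer=n
--             return answer
--
--     return answer
-- ===== SOURCE B (Python) =====
-- def solution(mats, park):
--     h = len(park)
--     w = len(park[0])
--     # 2D prefix sums: col[i][j] = number of '-1' cells in the first i rows, first j columns
--     pref = []
--     for row in park:
--         p = [0]
--         for cell in row:
--             p.append(p[-1] + (1 if cell == '-1' else 0))
--         pref.append(p)
--     col = [[0] * (w + 1)]
--     for p in pref:
--         col.append([a + b for a, b in zip(col[-1], p)])
--
--     def fits(n):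
--         if n < 0:
--             return False  # a negative mat never fits
--         target = n * n
--         for r in range(h - n + 1):
--             for c in range(w - n + 1):
--                 if col[r + n][c + n] - col[r + n][c] - col[r][c + n] + col[r][c] == target:
--                     return True
--         return False
--
--     for n in sorted(mats, reverse=True):
--         if fits(n):
--             return n
--     return -1
-- ===== Notes on version B (the rewrite author's own statement) =====
-- stated objective: faster
-- what changed: B precomputes a 2D prefix-sum table of '-1' cell counts once and tests each candidate square with an O(1) inclusion-exclusion lookup, instead of A's rescan of all n*n cells at every square position.
-- outside the precondition, e.g. on solution([1], [['-1', 'x'], ['a']]): A returns 1, B returns 1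
import Mathlib
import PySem

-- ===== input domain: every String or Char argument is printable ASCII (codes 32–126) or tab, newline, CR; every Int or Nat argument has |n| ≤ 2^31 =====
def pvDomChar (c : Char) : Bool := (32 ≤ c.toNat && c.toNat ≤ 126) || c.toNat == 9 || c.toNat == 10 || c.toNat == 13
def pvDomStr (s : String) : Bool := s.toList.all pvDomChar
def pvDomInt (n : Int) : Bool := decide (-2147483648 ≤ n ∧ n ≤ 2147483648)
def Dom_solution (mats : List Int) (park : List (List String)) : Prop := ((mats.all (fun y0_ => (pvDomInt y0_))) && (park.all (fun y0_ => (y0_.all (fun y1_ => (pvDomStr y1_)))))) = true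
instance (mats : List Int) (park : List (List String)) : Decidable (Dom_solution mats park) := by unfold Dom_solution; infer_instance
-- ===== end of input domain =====

-- B replaces A's per-square O(n²) rescans with a 2D prefix-sum table (O(1) per square).
-- Python A sorts `mats` in place (mutation not modelled); the equivalence is about the return value.

-- ===== PORT A =====
-- A's early-return scan over square positions is the `any` over the same positions;
-- `cnt` is reset to n*n before every position, so each position starts fresh at n*n.
def check (n width height : Int) (park : List (List String)) : Bool :=
  (PySem.List.pyRange 0 (height - n + 1)).any fun r =>
    (PySem.List.pyRange 0 (width - n + 1)).any fun c =>
      ((PySem.List.pyRange r (r + n)).foldl (fun cnt i =>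
          (PySem.List.pyRange c (c + n)).foldl (fun cnt j =>
            if PySem.List.pyGetD (PySem.List.pyGetD park i []) j "" == "-1" then cnt - 1 else cnt) cnt)
        (n * n)) == 0

def solutionGo (width height : Int) (park : List (List String)) : List Int → Int
  | [] => -1
  | n :: rest => if check n width height park then n else solutionGo width height park rest

def solution (mats : List Int) (park : List (List String)) : Int :=
  let width : Int := (PySem.List.pyGetD park 0 []).length
  let height : Int := park.length
  solutionGo width height park (PySem.List.sorted mats (fun x => x) true)

-- ===== PORT B =====
-- per-row running counts of '-1' (Python: p.append(p[-1] + …) == scanl)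
def prefRowB (row : List String) : List Int :=
  row.scanl (fun p cell => p + (if cell == "-1" then 1 else 0)) 0

-- column accumulation (Python: col.append([a+b for a,b in zip(col[-1], p)]) == scanl of zipWith)
def colB (w : Nat) (prefs : List (List Int)) : List (List Int) :=
  prefs.scanl (fun acc p => List.zipWith (· + ·) acc p) (List.replicate (w + 1) 0)

-- 'if n < 0 then false' is Source B's 'a negative mat never fits' early return
def fitsB (col : List (List Int)) (w h n : Int) : Bool :=
  if n < 0 then false else
  (PySem.List.pyRange 0 (h - n + 1)).any fun r =>
    (PySem.List.pyRange 0 (w - n + 1)).any fun c =>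
      PySem.List.pyGetD (PySem.List.pyGetD col (r + n) []) (c + n) 0 -
          PySem.List.pyGetD (PySem.List.pyGetD col (r + n) []) c 0 -
        PySem.List.pyGetD (PySem.List.pyGetD col r []) (c + n) 0 +
        PySem.List.pyGetD (PySem.List.pyGetD col r []) c 0 == n * n

def altGo (col : List (List Int)) (w h : Int) : List Int → Int
  | [] => -1
  | n :: rest => if fitsB col w h n then n else altGo col w h rest

def solution_alt (mats : List Int) (park : List (List String)) : Int :=
  let h : Int := park.length
  let w : Nat := (PySem.List.pyGetD park 0 []).length
  altGo (colB w (park.map prefRowB)) (w : Int) h (PySem.List.sorted mats (fun x => x) true)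

-- ===== PRECONDITION & SPEC =====
-- Pre_ excludes empty parks (A raises IndexError on park[0]) and parks where some row is
-- shorter than the first row (A raises IndexError whenever a scanned square overlaps the
-- missing cells; where A happens to return on such a park, B's zip-truncated prefix table
-- is accidental). Rows longer than the first are fine: both programs read only the first
-- len(park[0]) columns.
def Pre_solution (mats : List Int) (park : List (List String)) : Prop :=
  park ≠ [] ∧ (∀ row ∈ park, (PySem.List.pyGetD park 0 []).length ≤ row.length)
instance (mats : List Int) (park : List (List String)) : Decidable (Pre_solution mats park) := by
  unfold Pre_solution; infer_instance

def pvWitness_solution : List Int × List (List String) :=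
  ([2, 1], [["-1", "-1"], ["-1", "x"]])

def Spec_solution (mats : List Int) (park : List (List String)) (out : Int) : Prop := out = solution_alt mats park
instance (mats : List Int) (park : List (List String)) (out : Int) : Decidable (Spec_solution mats park out) := by unfold Spec_solution; infer_instance

-- ===== CLAIM (what is proved, stated in full; the proofs are below) =====
def Claim_equal_solution : Prop := ∀ (mats : List Int) (park : List (List String)), Dom_solution mats park → Pre_solution mats park → Spec_solution mats park (solution mats park)

-- ===== LEMMAS AND PROOFS =====

def pvE (cell : String) : Int := if cell == "-1" then 1 else 0

def pvRow (row : List String) (k : Nat) : Int := ((row.take k).map pvE).sum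

def pvCol (park : List (List String)) (i j : Nat) : Int :=
  ((park.take i).map (fun row => pvRow row j)).sum

-- number of '-1' cells in the n×n block at (r,c): the value both programs test against n*n
def pvBlock (park : List (List String)) (r c n : Nat) : Int :=
  (((park.drop r).take n).map (fun row => (((row.drop c).take n).map pvE).sum)).sum

lemma pv_scanl_getElem? {α β : Type} (f : β → α → β) (b : β) (l : List α) (k : Nat)
    (hk : k ≤ l.length) : (List.scanl f b l)[k]? = some ((l.take k).foldl f b) := by
  induction l generalizing b k with
  | nil =>
    have hk0 : k = 0 := by simpa using hk
    subst hk0; simp [List.scanl]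
  | cons x xs ih =>
    cases k with
    | zero => simp [List.scanl]
    | succ k => simpa [List.scanl] using ih (f b x) k (by simpa using hk)

lemma pv_prefRow_getD (row : List String) (k : Nat) (hk : k ≤ row.length) :
    (prefRowB row).getD k 0 = pvRow row k := by
  rw [List.getD_eq_getElem?_getD, prefRowB, pv_scanl_getElem? _ _ _ _ hk]
  rw [PySem.List.foldl_add _ (fun cell => if cell == "-1" then 1 else 0) 0]
  have he : (fun cell => if cell == "-1" then (1:Int) else 0) = pvE := by
    funext cell; simp [pvE]
  rw [he, pvRow, zero_add, Option.getD_some]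

lemma pv_foldl_zip_getD (ps : List (List Int)) (z : List Int)
    (hlen : ∀ p ∈ ps, z.length ≤ p.length) (j : Nat) (hj : j < z.length) :
    (ps.foldl (fun a p => List.zipWith (· + ·) a p) z).getD j 0 =
      z.getD j 0 + (ps.map (fun p => p.getD j 0)).sum := by
  induction ps generalizing z with
  | nil => simp
  | cons p ps ih =>
    have hp : z.length ≤ p.length := hlen p (List.mem_cons_self ..)
    have hz' : (List.zipWith (· + ·) z p).length = z.length := by
      simp [List.length_zipWith]; omega
    rw [List.foldl_cons, ih _ (fun q hq => by
      rw [hz']; exact hlen q (List.mem_cons_of_mem _ hq)) (by omega)]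
    have : (List.zipWith (· + ·) z p).getD j 0 = z.getD j 0 + p.getD j 0 := by
      rw [List.getD_eq_getElem?_getD, List.getD_eq_getElem?_getD, List.getD_eq_getElem?_getD]
      rw [List.getElem?_zipWith]
      rw [List.getElem?_eq_getElem (by omega), List.getElem?_eq_getElem (by omega : j < p.length)]
      simp
    rw [this, List.map_cons, List.sum_cons]; ring

lemma pv_col_getD (park : List (List String)) (w : Nat)
    (hw : ∀ row ∈ park, w ≤ row.length) (i j : Nat) (hi : i ≤ park.length) (hj : j ≤ w) :
    ((colB w (park.map prefRowB)).getD i []).getD j 0 = pvCol park i j := by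
  have houter : (colB w (park.map prefRowB)).getD i []
      = ((park.take i).map prefRowB).foldl (fun a p => List.zipWith (· + ·) a p)
          (List.replicate (w + 1) 0) := by
    rw [colB, List.getD_eq_getElem?_getD,
      pv_scanl_getElem? _ _ _ _ (by simpa using hi), Option.getD_some, List.map_take]
  have hlen : ∀ p ∈ (park.take i).map prefRowB, (List.replicate (w + 1) (0:Int)).length ≤ p.length := by
    intro p hp
    obtain ⟨row, hrow, rfl⟩ := List.mem_map.1 hp
    have : w ≤ row.length := hw row (List.mem_of_mem_take hrow)
    simp [prefRowB]; omega
  rw [houter, pv_foldl_zip_getD ((park.take i).map prefRowB) (List.replicate (w + 1) 0)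
      hlen j (by rw [List.length_replicate]; exact Nat.lt_succ_of_le hj)]
  rw [List.getD_replicate, List.map_map, zero_add, pvCol]
  congr 1
  refine List.map_congr_left (fun row hrow => ?_)
  have : w ≤ row.length := hw row (List.mem_of_mem_take hrow)
  · simpa using pv_prefRow_getD row j (by omega)
  · exact Nat.lt_succ_of_le hj

lemma pv_foldl_sub_if {α : Type} (p : α → Bool) (l : List α) (a : Int) :
    l.foldl (fun cnt x => if p x then cnt - 1 else cnt) a
      = a - (l.map (fun x => if p x then (1 : Int) else 0)).sum := by
  induction l generalizing a with
  | nil => simp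
  | cons x xs ih =>
    by_cases h : p x
    · simp only [List.foldl_cons, List.map_cons, List.sum_cons, h, if_pos]
      rw [ih]; ring
    · simp only [List.foldl_cons, List.map_cons, List.sum_cons, h, if_neg, Bool.false_eq_true, not_false_iff]
      rw [ih]; ring

lemma pv_foldl_sub {β : Type} (l : List β) (g : β → Int) (a : Int) :
    l.foldl (fun acc x => acc - g x) a = a - (l.map g).sum := by
  induction l generalizing a with
  | nil => simp
  | cons x xs ih => rw [List.foldl_cons, ih, List.map_cons, List.sum_cons]; ring

lemma pv_map_pyGetD_range {α : Type} (xs : List α) (d : α) (a b : Int)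
    (h0 : 0 ≤ a) (hab : a ≤ b) (hb : b ≤ (xs.length : Int)) :
    (PySem.List.pyRange a b).map (fun i => PySem.List.pyGetD xs i d)
      = (xs.drop a.toNat).take (b - a).toNat := by
  have hmem : ∀ i ∈ PySem.List.pyRange a b,
      PySem.List.pyGetD xs i d = PySem.List.pyGetD (xs.take b.toNat) i d := by
    intro i hi
    obtain ⟨hai, hib⟩ := PySem.List.mem_pyRange_one.1 hi
    rw [PySem.List.pyGetD_eq_getElem xs d (by omega) (by omega),
      PySem.List.pyGetD_eq_getElem (xs.take b.toNat) d (by omega)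
        (by simp [List.length_take]; omega)]
    exact (List.getElem_take).symm
  rw [List.map_congr_left hmem]
  have hlen : (PySem.List.len (xs.take b.toNat)) = b := by
    simp [PySem.List.len_eq, List.length_take]; omega
  rw [show PySem.List.pyRange a b
      = PySem.List.pyRange a (PySem.List.len (xs.take b.toNat)) from by rw [hlen],
    PySem.List.map_pyGetD_pyRange (xs.take b.toNat) d h0, List.drop_take]
  congr 1
  omega

lemma pv_sum_take_split {α : Type} (f : α → Int) (l : List α) (a b : Nat) :
    ((l.take (a + b)).map f).sum = ((l.take a).map f).sum + (((l.drop a).take b).map f).sum := by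
  rw [List.take_add, List.map_append, List.sum_append]

lemma pv_sum_map_sub {α : Type} (l : List α) (f g : α → Int) :
    (l.map (fun x => f x - g x)).sum = (l.map f).sum - (l.map g).sum := by
  induction l with
  | nil => simp
  | cons x xs ih => simp only [List.map_cons, List.sum_cons, ih]; ring

lemma pv_any_congr {α : Type} (l : List α) (p q : α → Bool)
    (h : ∀ x ∈ l, p x = q x) : l.any p = l.any q := by
  induction l with
  | nil => rfl
  | cons x xs ih =>
    simp only [List.any_cons, h x (List.mem_cons_self ..),
      ih (fun y hy => h y (List.mem_cons_of_mem _ hy))]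

lemma pv_check_inner (park : List (List String)) (w : Nat)
    (hw : ∀ row ∈ park, w ≤ row.length) (n r c : Int)
    (hn : 0 ≤ n) (hr : 0 ≤ r) (hc : 0 ≤ c)
    (hrn : r + n ≤ (park.length : Int)) (hcn : c + n ≤ (w : Int)) :
    (PySem.List.pyRange r (r + n)).foldl (fun cnt i =>
        (PySem.List.pyRange c (c + n)).foldl (fun cnt j =>
          if PySem.List.pyGetD (PySem.List.pyGetD park i []) j "" == "-1" then cnt - 1 else cnt) cnt)
      (n * n) = n * n - pvBlock park r.toNat c.toNat n.toNat := by
  simp only [pv_foldl_sub_if]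
  rw [pv_foldl_sub]
  congr 1
  have h1 : ∀ i ∈ PySem.List.pyRange r (r + n),
      ((PySem.List.pyRange c (c + n)).map (fun j =>
          if PySem.List.pyGetD (PySem.List.pyGetD park i []) j "" == "-1" then (1:Int) else 0)).sum
        = (fun row => (((row.drop c.toNat).take n.toNat).map pvE).sum)
            (PySem.List.pyGetD park i []) := by
    intro i hi
    obtain ⟨hri, hin⟩ := PySem.List.mem_pyRange_one.1 hi
    have hrowmem : PySem.List.pyGetD park i [] ∈ park := by
      rw [PySem.List.pyGetD_eq_getElem park [] (by omega) (by omega)]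
      exact List.getElem_mem _
    have hrl : (w : Int) ≤ ((PySem.List.pyGetD park i []).length : Int) := by
      exact_mod_cast hw _ hrowmem
    have hinner : (fun j => if PySem.List.pyGetD (PySem.List.pyGetD park i []) j "" == "-1" then (1:Int) else 0)
        = pvE ∘ (fun j => PySem.List.pyGetD (PySem.List.pyGetD park i []) j "") := by
      funext j; simp [pvE]
    rw [hinner, ← List.map_map,
      pv_map_pyGetD_range _ "" c (c + n) hc (by omega) (by omega)]
    simp only [add_sub_cancel_left]
  rw [List.map_congr_left h1]
  have hslice := pv_map_pyGetD_range park [] r (r + n) hr (by omega) (by omega)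
  simp only [add_sub_cancel_left] at hslice
  rw [pvBlock, ← hslice, List.map_map]
  rfl

lemma pv_fits_inner (park : List (List String)) (w : Nat)
    (hw : ∀ row ∈ park, w ≤ row.length) (n r c : Int)
    (hn : 0 ≤ n) (hr : 0 ≤ r) (hc : 0 ≤ c)
    (hrn : r + n ≤ (park.length : Int)) (hcn : c + n ≤ (w : Int)) :
    PySem.List.pyGetD (PySem.List.pyGetD (colB w (park.map prefRowB)) (r + n) []) (c + n) 0 -
      PySem.List.pyGetD (PySem.List.pyGetD (colB w (park.map prefRowB)) (r + n) []) c 0 -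
      PySem.List.pyGetD (PySem.List.pyGetD (colB w (park.map prefRowB)) r []) (c + n) 0 +
      PySem.List.pyGetD (PySem.List.pyGetD (colB w (park.map prefRowB)) r []) c 0
      = pvBlock park r.toNat c.toNat n.toNat := by
  rw [PySem.List.pyGetD_of_nonneg _ _ (by omega : (0:Int) ≤ r + n),
    PySem.List.pyGetD_of_nonneg _ _ hr]
  rw [PySem.List.pyGetD_of_nonneg _ _ (by omega : (0:Int) ≤ c + n),
    PySem.List.pyGetD_of_nonneg _ _ hc]
  rw [PySem.List.pyGetD_of_nonneg _ _ (by omega : (0:Int) ≤ c + n),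
    PySem.List.pyGetD_of_nonneg _ _ hc]
  rw [pv_col_getD park w hw (r+n).toNat (c+n).toNat (by omega) (by omega),
    pv_col_getD park w hw (r+n).toNat c.toNat (by omega) (by omega),
    pv_col_getD park w hw r.toNat (c+n).toNat (by omega) (by omega),
    pv_col_getD park w hw r.toNat c.toNat (by omega) (by omega)]
  have hcr : (r+n).toNat = r.toNat + n.toNat := by omega
  have hcc : (c+n).toNat = c.toNat + n.toNat := by omega
  rw [hcr, hcc]
  have split1 : ∀ j, pvCol park (r.toNat + n.toNat) j
      = pvCol park r.toNat j
        + (((park.drop r.toNat).take n.toNat).map (fun row => pvRow row j)).sum := by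
    intro j; simp only [pvCol]; exact pv_sum_take_split _ park r.toNat n.toNat
  rw [split1, split1, pvBlock]
  have hrow : ((park.drop r.toNat).take n.toNat).map
        (fun row => (((row.drop c.toNat).take n.toNat).map pvE).sum)
      = ((park.drop r.toNat).take n.toNat).map
        (fun row => pvRow row (c.toNat + n.toNat) - pvRow row c.toNat) := by
    refine List.map_congr_left (fun row _ => ?_)
    simp only [pvRow]
    rw [pv_sum_take_split pvE row c.toNat n.toNat]; ring
  rw [hrow, pv_sum_map_sub]
  ring

lemma pv_check_eq_fits (park : List (List String)) (w : Nat)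
    (hw : ∀ row ∈ park, w ≤ row.length) (n : Int) :
    check n (w : Int) (park.length : Int) park
      = fitsB (colB w (park.map prefRowB)) (w : Int) (park.length : Int) n := by
  by_cases hneg : n < 0
  · rw [check, fitsB, if_pos hneg]
    refine List.any_eq_false.mpr fun r _ => ?_
    simp only [Bool.not_eq_true]
    refine List.any_eq_false.mpr fun c _ => ?_
    simp only [Bool.not_eq_true]
    rw [PySem.List.pyRange_one_eq_nil (by omega : r + n ≤ r), List.foldl_nil]
    have hnz : n * n ≠ 0 := by
      have := mul_pos_of_neg_of_neg hneg hneg; omega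
    simp [hnz]
  · have hn : 0 ≤ n := by omega
    rw [check, fitsB, if_neg hneg]
    refine pv_any_congr _ _ _ (fun r hr => ?_)
    obtain ⟨hr0, hr1⟩ := PySem.List.mem_pyRange_one.1 hr
    refine pv_any_congr _ _ _ (fun c hc => ?_)
    obtain ⟨hc0, hc1⟩ := PySem.List.mem_pyRange_one.1 hc
    rw [pv_check_inner park w hw n r c hn hr0 hc0 (by omega) (by omega),
      pv_fits_inner park w hw n r c hn hr0 hc0 (by omega) (by omega)]
    rw [Bool.eq_iff_iff, beq_iff_eq, beq_iff_eq]
    omega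

lemma pv_go_eq (park : List (List String)) (w : Nat)
    (hw : ∀ row ∈ park, w ≤ row.length) (ms : List Int) :
    solutionGo (w : Int) (park.length : Int) park ms
      = altGo (colB w (park.map prefRowB)) (w : Int) (park.length : Int) ms := by
  induction ms with
  | nil => rfl
  | cons n rest ih =>
    simp only [solutionGo, altGo, pv_check_eq_fits park w hw n]
    split
    · rfl
    · exact ih

-- ===== VERDICT (by name: the statement is the Claim_ definition above) =====
theorem solution_spec : Claim_equal_solution := by
  intro mats park _ hpre
  obtain ⟨-, hw⟩ := hpre
  show solution mats park = solution_alt mats park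
  unfold solution solution_alt
  exact pv_go_eq park _ hw (PySem.List.sorted mats (fun x => x) true)
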